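-- pv_equiv track=rewrite | github.com/hackchyson/python3 | c10_advanced_programming_techniques/local_recursive.py | indented_list_sort
-- ===== SOURCE A (Python) =====
-- def indented_list_sort(indented_list, indent="    "):
--     # The entry structure
--     # alphabetic for clarity
--     KEY, ITEM, CHILDREN = range(3)
--
--     # Turning a list of strings into a list of entries.
--     def add_entry(level, key, item, chidren):
--         if level == 0:
--             chidren.append((key, item, []))  # Notice this thinking
--         else:
--             # The item is a child of the last item in the children list.
--             add_entry(level - 1, key, item, chidren[-1][CHILDREN])
--
--     def update_indented_list(entry):
--         indented_list.append(entry[ITEM])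
--         for subentry in sorted(entry[CHILDREN]):
--             update_indented_list(subentry)
--
--     entries = []
--     for item in indented_list:
--         level = 0
--         i = 0
--         # Determine the level of the item
--         while item.startswith(indent, i):
--             i += len(indent)
--             level += 1
--         key = item.strip().lower()
--         add_entry(level, key, item, entries)
--
--     indented_list = []
--     for entry in sorted(entries):
--         update_indented_list(entry)
--     return indented_list
-- ===== SOURCE B (Python) =====
-- def indented_list_sort(indented_list, indent="    "):
--     # Phase 1: build the entry tree iteratively with a path stack of open
--     # children lists (instead of recursive descent through the last child).
--     entries = []
--     path = [entries]
--     for item in indented_list: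
--         level = 0
--         i = 0
--         while item.startswith(indent, i):
--             i += len(indent)
--             level += 1
--         node = (item.strip().lower(), item, [])
--         del path[level + 1:]
--         path[level].append(node)
--         path.append(node[2])
--     # Phase 2: flatten depth-first with an explicit stack instead of recursion.
--     result = []
--     stack = [sorted(entries)[::-1]]
--     while stack:
--         top = stack[-1]
--         if not top:
--             stack.pop()
--             continue
--         _key, item, children = top.pop()
--         result.append(item)
--         stack.append(sorted(children)[::-1])
--     return result
-- ===== Notes on version B (the rewrite author's own statement) =====
-- stated objective: alternative
-- what changed: B builds the entry tree iteratively with a path stack of open children lists instead of A's recursive descent through children[-1], and flattens with an explicit stack instead of recursion; the tuple sort per level is unchanged.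
import Mathlib
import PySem

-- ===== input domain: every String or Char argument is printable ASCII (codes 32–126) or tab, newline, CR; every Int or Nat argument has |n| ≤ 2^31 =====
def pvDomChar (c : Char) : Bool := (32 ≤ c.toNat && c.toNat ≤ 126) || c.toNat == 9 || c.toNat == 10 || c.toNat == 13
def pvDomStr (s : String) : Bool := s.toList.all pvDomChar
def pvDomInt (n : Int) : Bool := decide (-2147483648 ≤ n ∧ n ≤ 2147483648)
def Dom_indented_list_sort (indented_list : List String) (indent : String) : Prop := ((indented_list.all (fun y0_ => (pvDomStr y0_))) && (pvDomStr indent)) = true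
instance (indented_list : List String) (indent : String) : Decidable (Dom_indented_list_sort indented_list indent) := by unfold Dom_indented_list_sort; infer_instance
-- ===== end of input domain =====

-- B rebuilds the entry tree iteratively with a path stack (a zipper in the port) instead of
-- A's recursive descent through the last child, and flattens with an explicit stack instead of
-- recursion; objective: alternative decomposition, same exact output.
-- Strings are handled as List Char (PySem convention); an entry (key, item, children) is the
-- mutual inductive PvEntry below, shared by both ports (both Pythons use the same tuples).

mutual
inductive PvEntry : Type
  | mk : List Char → List Char → PvEntryList → PvEntry
inductive PvEntryList : Type
  | nil : PvEntryList
  | cons : PvEntry → PvEntryList → PvEntryList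
end

-- Python list.append on a children list
def PvEntryList.push : PvEntryList → PvEntry → PvEntryList
  | .nil, e => .cons e .nil
  | .cons f fs, e => .cons f (fs.push e)

def PvEntryList.toList : PvEntryList → List PvEntry
  | .nil => []
  | .cons e fs => e :: fs.toList

-- Python's comparison of entry tuples (key, item, children), written as a three-way
-- comparison so the recursion is structural: strings compare code-point lexicographically,
-- child lists compare elementwise; 'a < b' is 'cmp a b = lt', exactly Python's tuple '<'
def pvCharsCmp : List Char → List Char → Ordering
  | [], [] => .eq
  | [], _ :: _ => .lt
  | _ :: _, [] => .gt
  | a :: as, b :: bs =>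
    match compare a b with
    | .eq => pvCharsCmp as bs
    | o => o

mutual
def PvEntry.cmp : PvEntry → PvEntry → Ordering
  | .mk k1 i1 c1, .mk k2 i2 c2 =>
    match pvCharsCmp k1 k2 with
    | .eq =>
      match pvCharsCmp i1 i2 with
      | .eq => PvEntryList.cmp c1 c2
      | o => o
    | o => o
def PvEntryList.cmp : PvEntryList → PvEntryList → Ordering
  | .nil, .nil => .eq
  | .nil, .cons _ _ => .lt
  | .cons _ _, .nil => .gt
  | .cons a as, .cons b bs =>
    match PvEntry.cmp a b with
    | .eq => PvEntryList.cmp as bs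
    | o => o
end

def PvEntry.lt (a b : PvEntry) : Bool := PvEntry.cmp a b == .lt

-- sorted(…): stable insertion sort w.r.t. the tuple order (both Pythons call builtin sorted)
def pvInsert (e : PvEntry) : List PvEntry → List PvEntry
  | [] => [e]
  | f :: fs => if PvEntry.lt e f then e :: f :: fs else f :: pvInsert e fs

def pvSort : List PvEntry → List PvEntry
  | [] => []
  | e :: es => pvInsert e (pvSort es)

-- the level-counting while loop of both Pythons ('item.startswith(indent, i)', i += len(indent)):
-- it counts how many complete copies of the indent prefix the item starts with, consuming the
-- item one character at a time (structural recursion; exact for every nonempty indent)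
def pvLevelGo (ind : List Char) : List Char → List Char → Nat
  | [], _ => 0
  | _ :: _, [] => 0   -- unreachable: the remaining-indent argument is kept nonempty
  | x :: cs, c :: rest =>
    if x = c then
      match rest with
      | [] => pvLevelGo ind cs ind + 1
      | r :: rs => pvLevelGo ind cs (r :: rs)
    else 0

def pvLevel (cs ind : List Char) : Nat :=
  match ind with
  | [] => 0   -- indent = "": Python's while loop never terminates; excluded by Pre_
  | c :: rest => pvLevelGo (c :: rest) cs (c :: rest)

-- key = item.strip().lower()
def pvKey (cs : List Char) : List Char := PySem.Chars.lower (PySem.Chars.strip cs)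

-- number of entries in an entry / a children list (the fuel measure for the two flatten loops)
mutual
def PvEntry.size : PvEntry → Nat
  | .mk _ _ c => c.size + 1
def PvEntryList.size : PvEntryList → Nat
  | .nil => 0
  | .cons e fs => e.size + fs.size
end

-- ===== PORT A =====

-- add_entry(level, key, item, children): recursive descent through children[-1] (the pair
-- below walks to the last list entry, then into its children — structural mutual recursion);
-- none = the IndexError Python raises on children[-1] of an empty list (excluded by Pre_)
mutual
def pvAddEntry (key it : List Char) : Nat → PvEntryList → Option PvEntryList
  | 0, c => some (c.push (.mk key it .nil))
  | _ + 1, .nil => none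
  | n + 1, .cons e .nil => (pvAddEntryLast key it n e).map (fun e' => .cons e' .nil)
  | n + 1, .cons e (.cons g gs) => (pvAddEntry key it (n + 1) (.cons g gs)).map (fun fs' => .cons e fs')
def pvAddEntryLast (key it : List Char) : Nat → PvEntry → Option PvEntry
  | n, .mk k i c => (pvAddEntry key it n c).map (fun c' => .mk k i c')
end

-- update_indented_list: item, then each sorted child recursively; the Nat argument is fuel
-- bounding the recursion depth (always called with fuel ≥ the entry's size, see pvFlatten)
def pvFlattenF : Nat → PvEntry → List (List Char)
  | 0, _ => []   -- unreachable: the fuel is always sufficient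
  | fuel + 1, .mk _ it c => it :: (pvSort c.toList).flatMap (pvFlattenF fuel)

def pvFlatten (e : PvEntry) : List (List Char) := pvFlattenF e.size e

def pvStepA (ind : List Char) (acc : Option PvEntryList) (item : String) : Option PvEntryList :=
  acc.bind (fun es => pvAddEntry (pvKey item.toList) item.toList (pvLevel item.toList ind) es)

def indented_list_sort (indented_list : List String) (indent : String) : List String :=
  match indented_list.foldl (pvStepA indent.toList) (some .nil) with
  | none => []   -- unreachable under Pre_: here Python A raises IndexError
  | some es => ((pvSort es.toList).flatMap pvFlatten).map (fun cs => String.ofList cs)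

-- ===== PORT B =====
-- A path frame (key, item, children-closed-so-far); path[0] is a virtual root frame whose
-- children are the top-level entries.  This zipper is the exact functional rendering of B's
-- alias path: closing a frame appends its finished entry to its parent's children.

def pvChain : (List Char × List Char × PvEntryList) → List (List Char × List Char × PvEntryList) → PvEntry
  | f, [] => .mk f.1 f.2.1 f.2.2
  | f, d :: ds => .mk f.1 f.2.1 (f.2.2.push (pvChain d ds))

def pvClosePath : List (List Char × List Char × PvEntryList) → PvEntryList
  | [] => .nil   -- unreachable: the path is never empty
  | f :: fs =>
    match fs with
    | [] => f.2.2
    | d :: ds => f.2.2.push (pvChain d ds)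

-- del path[level+1:]; path[level].append(node); path.append(node[2])
-- (on level > len(path)-1 Python B raises IndexError — outside Pre_; the port returns [])
def pvStep (key it : List Char) : Nat → List (List Char × List Char × PvEntryList) → List (List Char × List Char × PvEntryList)
  | _, [] => []
  | 0, f :: fs =>
    let ch := match fs with
      | [] => f.2.2
      | d :: ds => f.2.2.push (pvChain d ds)
    (f.1, f.2.1, ch) :: [(key, it, .nil)]
  | n + 1, f :: fs => f :: pvStep key it n fs

def pvStepB (ind : List Char) (p : List (List Char × List Char × PvEntryList)) (item : String) : List (List Char × List Char × PvEntryList) :=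
  pvStep (pvKey item.toList) item.toList (pvLevel item.toList ind) p

def pvLSize (l : List PvEntry) : Nat := (l.map PvEntry.size).sum

-- the while-stack flattening loop of B; the first argument is fuel bounding the number of
-- loop iterations (always called with sufficient fuel, see indented_list_sort_alt).
-- B keeps each stacked list reversed and pops from its end, so here each stacked Lean list
-- is held next-element-first: its head is the Python list's last element
def pvFlatLoopF : Nat → List (List PvEntry) → List (List Char) → List (List Char)
  | 0, _, acc => acc.reverse   -- unreachable: the fuel is always sufficient
  | _ + 1, [], acc => acc.reverse
  | fuel + 1, [] :: rest, acc => pvFlatLoopF fuel rest acc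
  | fuel + 1, (PvEntry.mk _ it c :: es) :: rest, acc =>
    pvFlatLoopF fuel (pvSort c.toList :: es :: rest) (it :: acc)

def indented_list_sort_alt (indented_list : List String) (indent : String) : List String :=
  (pvFlatLoopF
    (2 * pvLSize (pvSort (pvClosePath (indented_list.foldl (pvStepB indent.toList)
        [(([] : List Char), ([] : List Char), PvEntryList.nil)])).toList) + 2)
    [pvSort (pvClosePath (indented_list.foldl (pvStepB indent.toList)
        [(([] : List Char), ([] : List Char), PvEntryList.nil)])).toList]
    []).map (fun cs => String.ofList cs)

-- ===== PRECONDITION & SPEC =====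
-- levels must start at 0 and never jump by more than +1, else both Pythons raise IndexError;
-- indent = "" with a nonempty list is excluded because there Python's level-counting while
-- loop never terminates (with an empty list it is never entered, so that case stays inside).
def pvOkLevels : List Nat → Nat → Bool
  | [], _ => true
  | l :: ls, cap => decide (l ≤ cap) && pvOkLevels ls (l + 1)

def Pre_indented_list_sort (indented_list : List String) (indent : String) : Prop :=
  (indented_list = [] ∨ indent ≠ "") ∧ pvOkLevels (indented_list.map (fun s => pvLevel s.toList indent.toList)) 0 = true
instance (indented_list : List String) (indent : String) : Decidable (Pre_indented_list_sort indented_list indent) := by unfold Pre_indented_list_sort; infer_instance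

def pvWitness_indented_list_sort : List String × String := (["b", "    B", "    a", "A"], "    ")

def Spec_indented_list_sort (indented_list : List String) (indent : String) (out : List String) : Prop := out = indented_list_sort_alt indented_list indent
instance (indented_list : List String) (indent : String) (out : List String) : Decidable (Spec_indented_list_sort indented_list indent out) := by unfold Spec_indented_list_sort; infer_instance

-- ===== CLAIM (what is proved, stated in full; the proofs are below) =====
def Claim_equal_indented_list_sort : Prop := ∀ (indented_list : List String) (indent : String), Dom_indented_list_sort indented_list indent → Pre_indented_list_sort indented_list indent → Spec_indented_list_sort indented_list indent (indented_list_sort indented_list indent)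

-- ===== LEMMAS AND PROOFS =====

theorem pvInsert_perm (e : PvEntry) (l : List PvEntry) : (pvInsert e l).Perm (e :: l) := by
  induction l with
  | nil => simp [pvInsert]
  | cons f fs ih =>
    simp only [pvInsert]
    split
    · exact List.Perm.refl _
    · exact (List.Perm.cons f ih).trans (List.Perm.swap e f fs)

theorem pvSort_perm (l : List PvEntry) : (pvSort l).Perm l := by
  induction l with
  | nil => exact List.Perm.refl _
  | cons e es ih => exact (pvInsert_perm e (pvSort es)).trans (List.Perm.cons e ih)

theorem mem_pvSort {x : PvEntry} {l : List PvEntry} (h : x ∈ pvSort l) : x ∈ l :=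
  (pvSort_perm l).mem_iff.mp h

theorem size_le_of_mem_toList : ∀ (l : PvEntryList) (x : PvEntry), x ∈ l.toList → x.size ≤ l.size
  | .nil, x => by simp [PvEntryList.toList]
  | .cons e fs, x => by
    intro h
    simp only [PvEntryList.toList, List.mem_cons] at h
    rcases h with h | h
    · subst h; simp [PvEntryList.size]
    · have := size_le_of_mem_toList fs x h
      simp [PvEntryList.size]; omega

theorem pvEntry_size_pos (e : PvEntry) : 1 ≤ e.size := by
  cases e; simp [PvEntry.size]


theorem pvChain_eq (d : List Char × List Char × PvEntryList) (ds : List (List Char × List Char × PvEntryList)) :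
    pvChain d ds = .mk d.1 d.2.1 (pvClosePath (d :: ds)) := by
  cases ds <;> rfl

theorem pvAddEntry_push (key it : List Char) (n : Nat) (k i : List Char) (c : PvEntryList) :
    ∀ (xs : PvEntryList),
    pvAddEntry key it (n + 1) (xs.push (.mk k i c)) = (pvAddEntry key it n c).map (fun c' => xs.push (.mk k i c'))
  | .nil => by
    simp only [PvEntryList.push, pvAddEntry, pvAddEntryLast]
    cases pvAddEntry key it n c <;> simp
  | .cons f fs => by
    have ih := pvAddEntry_push key it n k i c fs
    cases h : fs.push (.mk k i c) with
    | nil => cases fs <;> simp [PvEntryList.push] at h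
    | cons g gs =>
      simp only [PvEntryList.push]
      rw [h]
      simp only [pvAddEntry]
      rw [← h, ih]
      cases pvAddEntry key it n c <;> simp

theorem pvStep_head (key it : List Char) (d : List Char × List Char × PvEntryList)
    (ds : List (List Char × List Char × PvEntryList)) (L : Nat) :
    ∃ ch rest, pvStep key it L (d :: ds) = (d.1, d.2.1, ch) :: rest := by
  cases L with
  | zero => exact ⟨_, _, rfl⟩
  | succ n => exact ⟨d.2.2, pvStep key it n ds, rfl⟩

theorem pvStep_comm (key it : List Char) :
    ∀ (L : Nat) (f : List Char × List Char × PvEntryList) (fs : List (List Char × List Char × PvEntryList)),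
    L ≤ fs.length →
    pvAddEntry key it L (pvClosePath (f :: fs)) = some (pvClosePath (pvStep key it L (f :: fs))) := by
  intro L
  induction L with
  | zero =>
    intro f fs _
    cases fs <;> simp [pvStep, pvClosePath, pvChain, pvAddEntry]
  | succ n ih =>
    intro f fs hle
    cases fs with
    | nil => simp at hle
    | cons d ds =>
      have hnd : n ≤ ds.length := by simpa using hle
      have h1 : pvClosePath (f :: d :: ds) = f.2.2.push (.mk d.1 d.2.1 (pvClosePath (d :: ds))) := by
        simp [pvClosePath, pvChain_eq d ds]
      rw [h1, pvAddEntry_push, ih d ds hnd]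
      obtain ⟨ch, rest, hstep⟩ := pvStep_head key it d ds n
      simp only [pvStep, Option.map_some, hstep]
      simp [pvClosePath, pvChain_eq (d.1, d.2.1, ch) rest]

theorem pvStep_length (key it : List Char) :
    ∀ (L : Nat) (f : List Char × List Char × PvEntryList) (fs : List (List Char × List Char × PvEntryList)),
    L ≤ fs.length → (pvStep key it L (f :: fs)).length = L + 2 := by
  intro L
  induction L with
  | zero => intro f fs _; simp [pvStep]
  | succ n ih =>
    intro f fs hle
    cases fs with
    | nil => simp at hle
    | cons d ds =>
      have hnd : n ≤ ds.length := by simpa using hle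
      simp [pvStep, ih d ds hnd]

theorem pvBuild_comm (ind : List Char) :
    ∀ (items : List String) (f : List Char × List Char × PvEntryList)
      (fs : List (List Char × List Char × PvEntryList)),
    pvOkLevels (items.map (fun s => pvLevel s.toList ind)) fs.length = true →
    items.foldl (pvStepA ind) (some (pvClosePath (f :: fs))) =
      some (pvClosePath (items.foldl (pvStepB ind) (f :: fs))) := by
  intro items
  induction items with
  | nil => intro f fs _; rfl
  | cons item rest ih =>
    intro f fs hok
    simp only [List.map, pvOkLevels, Bool.and_eq_true, decide_eq_true_eq] at hok
    obtain ⟨hle, hrest⟩ := hok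
    set L := pvLevel item.toList ind with hL
    have hstep := pvStep_comm (pvKey item.toList) item.toList L f fs hle
    have hlen := pvStep_length (pvKey item.toList) item.toList L f fs hle
    simp only [List.foldl_cons]
    have hA : pvStepA ind (some (pvClosePath (f :: fs))) item =
        some (pvClosePath (pvStep (pvKey item.toList) item.toList L (f :: fs))) := by
      simp only [pvStepA, Option.bind, ← hL]
      exact hstep
    rw [hA]
    cases hp : pvStep (pvKey item.toList) item.toList L (f :: fs) with
    | nil => rw [hp] at hlen; simp at hlen
    | cons g gs =>
      have hgs : gs.length = L + 1 := by
        rw [hp] at hlen; simp at hlen; omega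
      have hB : pvStepB ind (f :: fs) item = g :: gs := by
        simp only [pvStepB, ← hL, hp]
      rw [hB]
      exact ih g gs (by rw [hgs]; exact hrest)

theorem pvFlattenF_congr : ∀ (f : Nat) (e : PvEntry) (g : Nat),
    e.size ≤ f → e.size ≤ g → pvFlattenF f e = pvFlattenF g e := by
  intro f
  induction f with
  | zero => intro e g hf _; have := pvEntry_size_pos e; omega
  | succ n ih =>
    intro e g hf hg
    cases g with
    | zero => have := pvEntry_size_pos e; omega
    | succ m =>
      cases e with
      | mk k it c =>
        simp only [PvEntry.size] at hf hg
        simp only [pvFlattenF, List.cons.injEq, true_and]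
        apply List.flatMap_congr
        intro x hx
        have hxc : PvEntry.size x ≤ PvEntryList.size c := size_le_of_mem_toList c x (mem_pvSort hx)
        exact ih x m (by omega) (by omega)

theorem pvFlatten_of_le {f : Nat} {e : PvEntry} (h : e.size ≤ f) : pvFlattenF f e = pvFlatten e :=
  pvFlattenF_congr f e e.size h (Nat.le_refl _)

theorem pvLSize_pvSort (l : List PvEntry) : pvLSize (pvSort l) = pvLSize l :=
  List.Perm.sum_eq ((pvSort_perm l).map PvEntry.size)

theorem pvLSize_toList : ∀ (c : PvEntryList), pvLSize c.toList = c.size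
  | .nil => by simp [PvEntryList.toList, pvLSize, PvEntryList.size]
  | .cons e fs => by
    have := pvLSize_toList fs
    simp [PvEntryList.toList, pvLSize, PvEntryList.size] at *
    omega

theorem pvFlatLoopF_eq : ∀ (fuel : Nat) (stack : List (List PvEntry)) (acc : List (List Char)),
    2 * (stack.map pvLSize).sum + stack.length < fuel →
    pvFlatLoopF fuel stack acc = acc.reverse ++ stack.flatMap (fun l => l.flatMap pvFlatten) := by
  intro fuel
  induction fuel with
  | zero => intro stack acc h; omega
  | succ n ih =>
    intro stack acc h
    match stack with
    | [] => simp [pvFlatLoopF]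
    | [] :: rest =>
      rw [pvFlatLoopF, ih rest acc (by simp [pvLSize] at h ⊢; omega)]
      simp
    | (PvEntry.mk k it c :: es) :: rest =>
      rw [pvFlatLoopF, ih (pvSort c.toList :: es :: rest) (it :: acc) ?_]
      · have hfl : pvFlatten (PvEntry.mk k it c) = it :: (pvSort c.toList).flatMap pvFlatten := by
          have hcg : (pvSort c.toList).flatMap (pvFlattenF (PvEntryList.size c)) =
              (pvSort c.toList).flatMap pvFlatten := by
            apply List.flatMap_congr
            intro x hx
            exact pvFlatten_of_le (size_le_of_mem_toList c x (mem_pvSort hx))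
          simp only [pvFlatten, PvEntry.size, pvFlattenF]
          rw [hcg]
        simp [hfl]
      · have h3 : (List.map PvEntry.size (pvSort c.toList)).sum = PvEntryList.size c := by
          have := (pvLSize_pvSort c.toList).trans (pvLSize_toList c)
          simpa [pvLSize] using this
        simp [pvLSize, PvEntry.size] at h ⊢
        omega

-- ===== VERDICT (by name: the statement is the Claim_ definition above) =====
theorem indented_list_sort_spec : Claim_equal_indented_list_sort := by
  intro il indent _ hpre
  obtain ⟨-, hok⟩ := hpre
  unfold Spec_indented_list_sort indented_list_sort indented_list_sort_alt
  have hinit : (some PvEntryList.nil : Option PvEntryList) =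
      some (pvClosePath [(([] : List Char), ([] : List Char), PvEntryList.nil)]) := rfl
  rw [hinit, pvBuild_comm indent.toList il (([] : List Char), ([] : List Char), PvEntryList.nil) [] hok]
  rw [pvFlatLoopF_eq _ _ [] (by simp)]
  simp
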